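-- pv_equiv track=rewrite | github.com/asilverlight/ET-Agent | pareto/utils.py | remove_result_tags
-- ===== SOURCE A (Python) =====
-- def remove_result_tags(s):
--     # 用find方法去除所有<result>...</result>内容
--     result_start = s.find('<result>')
--     while result_start != -1:
--         result_end = s.find('</result>', result_start)
--         if result_end == -1:
--             break
--         s = s[:result_start] + s[result_end + len('</result>'):]
--         result_start = s.find('<result>')
--     return s
-- ===== SOURCE B (Python) =====
-- def remove_result_tags(s):
--     # Alternative: one left-to-right pass with a kept-output buffer: record where a '<result>'
--     # completes, and when a '</result>' later completes, cut the buffer back to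
--     # that mark; re-formed tags across a cut are caught because checks run on the
--     # buffer's live tail.
--     out = []
--     open_pos = None
--     for c in s:
--         out.append(c)
--         if open_pos is None:
--             if out[-8:] == list('<result>'):
--                 open_pos = len(out) - 8
--         else:
--             if out[-9:] == list('</result>'):
--                 del out[open_pos:]
--                 open_pos = None
--     return ''.join(out)
-- ===== Notes on version B (the rewrite author's own statement) =====
-- stated objective: alternative
-- what changed: Replaced A's restart-from-the-start find/splice loop (re-scanning the whole remaining string after every removal) by a single left-to-right pass that keeps an output buffer and the position of the first un-closed open tag, cutting the buffer back when a close tag completes.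
import Mathlib
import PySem

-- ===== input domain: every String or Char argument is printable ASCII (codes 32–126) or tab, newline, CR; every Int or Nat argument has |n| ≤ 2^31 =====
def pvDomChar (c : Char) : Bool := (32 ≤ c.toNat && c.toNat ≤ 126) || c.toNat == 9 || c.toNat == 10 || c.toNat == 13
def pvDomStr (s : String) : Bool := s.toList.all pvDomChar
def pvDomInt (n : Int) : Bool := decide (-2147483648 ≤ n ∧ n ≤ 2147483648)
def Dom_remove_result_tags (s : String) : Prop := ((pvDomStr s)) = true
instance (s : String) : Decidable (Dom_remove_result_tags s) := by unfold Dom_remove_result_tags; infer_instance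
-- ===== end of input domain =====

-- B replaces A's restart-from-the-beginning find/splice loop by a single left-to-right
-- pass over the string with a kept-output buffer and an open-tag mark (objective: alternative).

-- ===== PORT A =====
def pvOpenT : List Char := ['<', 'r', 'e', 's', 'u', 'l', 't', '>']
def pvCloseT : List Char := ['<', '/', 'r', 'e', 's', 'u', 'l', 't', '>']

-- termination helper for the port's loop (each splice strictly shortens the string)
theorem pvRemoveDec (s : List Char)
    (hi : ¬ PySem.Chars.find s pvOpenT = -1)
    (hj : ¬ PySem.Chars.findFrom s pvCloseT (PySem.Chars.find s pvOpenT) none = -1) :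
    (PySem.List.slice s none (some (PySem.Chars.find s pvOpenT)) ++
      PySem.List.slice s (some (PySem.Chars.findFrom s pvCloseT (PySem.Chars.find s pvOpenT) none + 9)) none).length
      < s.length := by
  have h0 : -1 ≤ PySem.Chars.find s pvOpenT := PySem.Chars.neg_one_le_find s pvOpenT
  have h1 : 0 ≤ PySem.Chars.find s pvOpenT := by omega
  have hle : PySem.Chars.find s pvOpenT ≤ s.length := PySem.Chars.find_le_length s pvOpenT
  set i := PySem.Chars.find s pvOpenT with hidef
  have hik : i = ((i.toNat : Nat) : Int) := by omega
  have hk : i.toNat ≤ s.length := by omega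
  have hspec := PySem.Chars.findFrom_natCast_spec s pvCloseT i.toNat hk (by rw [← hik]; exact hj)
  rw [← hik] at hspec
  set j := PySem.Chars.findFrom s pvCloseT i none with hjdef
  have hij : i ≤ j := hspec.1
  have hcl : pvCloseT <+: s.drop j.toNat := hspec.2.1
  have hclen : 9 ≤ (s.drop j.toNat).length := by
    have := hcl.length_le; simpa [pvCloseT] using this
  have hjlen : j.toNat + 9 ≤ s.length := by
    rw [List.length_drop] at hclen; omega
  have hj0 : 0 ≤ j := by omega
  rw [PySem.List.slice_to s h1, PySem.List.slice_from s (by omega : (0:Int) ≤ j + 9)]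
  have h9 : (j + 9).toNat = j.toNat + 9 := by omega
  rw [h9]
  simp only [List.length_append, List.length_take, List.length_drop]
  omega

def pvRemoveLoop (s : List Char) : List Char :=
  if _hi : PySem.Chars.find s pvOpenT = -1 then s
  else if _hj : PySem.Chars.findFrom s pvCloseT (PySem.Chars.find s pvOpenT) none = -1 then s
  else pvRemoveLoop
    (PySem.List.slice s none (some (PySem.Chars.find s pvOpenT)) ++
      PySem.List.slice s (some (PySem.Chars.findFrom s pvCloseT (PySem.Chars.find s pvOpenT) none + 9)) none)
termination_by s.length
decreasing_by exact pvRemoveDec s _hi _hj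

def remove_result_tags (s : String) : String := String.ofList (pvRemoveLoop s.toList)

-- ===== PORT B =====
def pvScan : List Char → List Char → Option Nat → List Char
  | [], out, _ => out
  | c :: cs, out, none =>
      let out' := out ++ [c]
      if PySem.List.slice out' (some (-8)) none = pvOpenT then
        pvScan cs out' (some (out'.length - 8))
      else
        pvScan cs out' none
  | c :: cs, out, some p =>
      let out' := out ++ [c]
      if PySem.List.slice out' (some (-9)) none = pvCloseT then
        pvScan cs (out'.take p) none
      else
        pvScan cs out' (some p)

def remove_result_tags_alt (s : String) : String := String.ofList (pvScan s.toList [] none)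

-- ===== PRECONDITION & SPEC =====
def Spec_remove_result_tags (s : String) (out : String) : Prop := out = remove_result_tags_alt s
instance (s : String) (out : String) : Decidable (Spec_remove_result_tags s out) := by unfold Spec_remove_result_tags; infer_instance

-- ===== CLAIM (what is proved, stated in full; the proofs are below) =====
def Claim_equal_remove_result_tags : Prop := ∀ (s : String), Dom_remove_result_tags s → Spec_remove_result_tags s (remove_result_tags s)

-- ===== LEMMAS AND PROOFS =====

-- the scan invariant: with state `none` the kept buffer contains no '<result>';
-- with state `some p` the first '<result>' of the buffer is exactly at p and no
-- '</result>' occurs in the buffer at or after p.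
def pvInv (out : List Char) : Option Nat → Prop
  | none => ¬ pvOpenT <:+: out
  | some p => p + 8 ≤ out.length ∧ pvOpenT <+: out.drop p ∧
      (∀ q, q < p → ¬ pvOpenT <+: out.drop q) ∧ ¬ pvCloseT <:+: out.drop p

theorem pvPrefixOfAppend {sub l t : List Char} (h : sub <+: l ++ t)
    (hlen : sub.length ≤ l.length) : sub <+: l := by
  have := List.prefix_iff_eq_take.mp h
  rw [List.take_append_of_le_length hlen] at this
  exact this ▸ List.take_prefix _ _

theorem pvInfixSingleton {sub l : List Char} {c : Char} (h : sub <:+: l ++ [c]) :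
    sub <:+: l ∨ sub <:+ (l ++ [c]) := by
  obtain ⟨u, v, huv⟩ := h
  rcases List.eq_nil_or_concat v with rfl | ⟨q, d, rfl⟩
  · right; exact ⟨u, by simpa using huv⟩
  · left
    have : (u ++ sub ++ q) ++ [d] = l ++ [c] := by simpa using huv
    have h2 := (List.append_singleton_inj.mp this).1
    exact ⟨u, q, by simpa using h2⟩

theorem pvNoInfixIffNoDropPrefix (sub s : List Char) :
    ¬ sub <:+: s ↔ ∀ q, ¬ sub <+: s.drop q := by
  constructor
  · intro h q hq
    exact h (List.infix_iff_prefix_suffix.mpr ⟨s.drop q, hq, List.drop_suffix q s⟩)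
  · intro h hi
    obtain ⟨u, v, huv⟩ := hi
    exact h u.length (by rw [← huv, List.append_assoc, List.drop_left]; exact ⟨v, rfl⟩)

theorem pvFindEqOfFirst (s sub : List Char) (p : Nat) (h1 : sub <+: s.drop p)
    (h2 : ∀ q, q < p → ¬ sub <+: s.drop q) : PySem.Chars.find s sub = (p : Int) := by
  have hinf : sub <:+: s := List.infix_iff_prefix_suffix.mpr ⟨s.drop p, h1, List.drop_suffix p s⟩
  have hne : PySem.Chars.find s sub ≠ -1 := (PySem.Chars.find_ne_neg_one_iff s sub).mpr hinf
  have h0 : 0 ≤ PySem.Chars.find s sub := (PySem.Chars.find_nonneg_iff s sub).mpr hinf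
  have hspec := PySem.Chars.find_spec (s := s) (sub := sub) h0
  rcases lt_trichotomy (PySem.Chars.find s sub).toNat p with h | h | h
  · exact absurd hspec.1 (h2 _ h)
  · omega
  · exact absurd h1 (hspec.2 p h)

theorem pvDropSuffixIff (xs pat : List Char) (k : Nat) (hk : pat.length = k) :
    xs.drop (xs.length - k) = pat ↔ pat <:+ xs := by
  constructor
  · intro h; exact h ▸ List.drop_suffix _ _
  · rintro ⟨t, rfl⟩
    have hlen : (t ++ pat).length - k = t.length := by simp [hk]
    rw [hlen, List.drop_left]

theorem pvOpenSliceIff (xs : List Char) :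
    PySem.List.slice xs (some (-8)) none = pvOpenT ↔ pvOpenT <:+ xs := by
  rw [PySem.List.slice_from_neg_ofNat xs 8 (by norm_num)]
  exact pvDropSuffixIff xs pvOpenT 8 (by decide)

theorem pvCloseSliceIff (xs : List Char) :
    PySem.List.slice xs (some (-9)) none = pvCloseT ↔ pvCloseT <:+ xs := by
  rw [PySem.List.slice_from_neg_ofNat xs 9 (by norm_num)]
  exact pvDropSuffixIff xs pvCloseT 9 (by decide)

theorem pvScanEq (rest : List Char) : ∀ (out : List Char) (st : Option Nat),
    pvInv out st → pvRemoveLoop (out ++ rest) = pvScan rest out st := by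
  induction rest with
  | nil =>
    intro out st hinv
    rw [List.append_nil]
    cases st with
    | none =>
      have hf : PySem.Chars.find out pvOpenT = -1 :=
        (PySem.Chars.find_eq_neg_one_iff out pvOpenT).mpr hinv
      rw [pvRemoveLoop, dif_pos hf]; rfl
    | some p =>
      obtain ⟨hlen, hpre, hmin, hnoc⟩ := hinv
      have hf : PySem.Chars.find out pvOpenT = (p : Int) := pvFindEqOfFirst out pvOpenT p hpre hmin
      have hk : p ≤ out.length := by omega
      have hff : PySem.Chars.findFrom out pvCloseT ((p : Nat) : Int) none = -1 :=
        (PySem.Chars.findFrom_natCast_eq_neg_one_iff out pvCloseT p hk).mpr hnoc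
      rw [pvRemoveLoop, hf, dif_neg (by omega), dif_pos hff]; rfl
  | cons c cs ih =>
    intro out st hinv
    have hsplit : out ++ c :: cs = (out ++ [c]) ++ cs := by simp
    cases st with
    | none =>
      simp only [pvScan]
      by_cases hcond : PySem.List.slice (out ++ [c]) (some (-8)) none = pvOpenT
      · rw [if_pos hcond, hsplit]
        have hdrop : (out ++ [c]).drop ((out ++ [c]).length - 8) = pvOpenT := by
          rw [PySem.List.slice_from_neg_ofNat (out ++ [c]) 8 (by norm_num)] at hcond
          exact hcond
        have hsuf : pvOpenT <:+ out ++ [c] := (pvOpenSliceIff _).mp hcond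
        have h8 : 8 ≤ (out ++ [c]).length := by
          have := hsuf.length_le; simpa [pvOpenT] using this
        apply ih
        refine ⟨by simp at h8 ⊢; omega, hdrop ▸ List.prefix_rfl, ?_, ?_⟩
        · intro q hq hp
          have hq8 : q + 8 ≤ out.length := by simp at h8 hq ⊢; omega
          rw [List.drop_append_of_le_length (by omega)] at hp
          exact (pvNoInfixIffNoDropPrefix pvOpenT out).mp hinv q
            (pvPrefixOfAppend hp (by simp [pvOpenT]; omega))
        · intro hc
          have := hc.length_le
          simp [pvCloseT] at this
          omega
      · rw [if_neg hcond, hsplit]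
        apply ih
        intro hi
        rcases pvInfixSingleton hi with h | h
        · exact hinv h
        · exact hcond ((pvOpenSliceIff _).mpr h)
    | some p =>
      obtain ⟨hlen, hpre, hmin, hnoc⟩ := hinv
      have hpout : p ≤ out.length := by omega
      simp only [pvScan]
      by_cases hcond : PySem.List.slice (out ++ [c]) (some (-9)) none = pvCloseT
      · rw [if_pos hcond, hsplit]
        have hdrop : (out ++ [c]).drop ((out ++ [c]).length - 9) = pvCloseT := by
          rw [PySem.List.slice_from_neg_ofNat (out ++ [c]) 9 (by norm_num)] at hcond
          exact hcond
        have h9 : 9 ≤ (out ++ [c]).length := by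
          have := ((pvCloseSliceIff _).mp hcond).length_le
          simpa [pvCloseT] using this
        have hn8 : 8 ≤ out.length := by omega
        -- the full remaining string
        have hs : (out ++ [c]) ++ cs = out ++ ([c] ++ cs) := by simp
        have hfind : PySem.Chars.find ((out ++ [c]) ++ cs) pvOpenT = (p : Int) := by
          apply pvFindEqOfFirst
          · rw [hs, List.drop_append_of_le_length hpout]
            exact hpre.trans (List.prefix_append _ _)
          · intro q hq hp
            rw [hs, List.drop_append_of_le_length (by omega)] at hp
            exact hmin q hq (pvPrefixOfAppend hp (by simp [pvOpenT]; omega))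
        have hfindC : PySem.Chars.find (((out ++ [c]) ++ cs).drop p) pvCloseT
            = ((out.length - 8 - p : Nat) : Int) := by
          apply pvFindEqOfFirst
          · rw [List.drop_drop]
            have he : p + (out.length - 8 - p) = out.length - 8 := by omega
            rw [he]
            have h1 : ((out ++ [c]) ++ cs).drop (out.length - 8)
                = (out ++ [c]).drop (out.length - 8) ++ cs :=
              List.drop_append_of_le_length (by simp only [List.length_append, List.length_cons, List.length_nil]; omega)
            have h2 : (out ++ [c]).drop (out.length - 8) = pvCloseT := by
              have : (out ++ [c]).length - 9 = out.length - 8 := by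
                simp only [List.length_append, List.length_cons, List.length_nil]; omega
              rw [← this]; exact hdrop
            rw [h1, h2]
            exact List.prefix_append _ _
          · intro r hr hp
            rw [List.drop_drop] at hp
            have hrp : p + r + 9 ≤ out.length := by omega
            rw [hs, List.drop_append_of_le_length (by omega)] at hp
            have hcp : pvCloseT <+: out.drop (p + r) :=
              pvPrefixOfAppend hp (by simp [pvCloseT]; omega)
            apply hnoc
            refine List.infix_iff_prefix_suffix.mpr ⟨(out.drop p).drop r, ?_, List.drop_suffix _ _⟩
            rw [List.drop_drop]
            exact hcp
        have hkp : p ≤ ((out ++ [c]) ++ cs).length := by simp; omega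
        have hff : PySem.Chars.findFrom ((out ++ [c]) ++ cs) pvCloseT ((p : Nat) : Int) none
            = ((out.length - 8 : Nat) : Int) := by
          rw [PySem.Chars.findFrom_natCast _ pvCloseT p hkp, hfindC]
          rw [if_neg (by omega)]
          omega
        rw [pvRemoveLoop, hfind, dif_neg (by omega), hff, dif_neg (by omega)]
        have hsl1 : PySem.List.slice ((out ++ [c]) ++ cs) none (some ((p : Nat) : Int))
            = out.take p := by
          rw [PySem.List.slice_to _ (by omega)]
          have : ((p : Nat) : Int).toNat = p := by omega
          rw [this, hs, List.take_append_of_le_length hpout]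
        have hsl2 : PySem.List.slice ((out ++ [c]) ++ cs)
            (some (((out.length - 8 : Nat) : Int) + 9)) none = cs := by
          rw [PySem.List.slice_from _ (by omega)]
          have : (((out.length - 8 : Nat) : Int) + 9).toNat = (out ++ [c]).length := by
            simp; omega
          rw [this, List.drop_left]
        rw [hsl1, hsl2]
        have hto : (out ++ [c]).take p = out.take p := List.take_append_of_le_length hpout
        rw [hto]
        apply ih
        show ¬ pvOpenT <:+: out.take p
        rw [pvNoInfixIffNoDropPrefix]
        intro q hp'
        have hql : 8 ≤ ((out.take p).drop q).length := by
          have := hp'.length_le; simpa [pvOpenT] using this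
        have hq : q < p := by simp at hql; omega
        rw [List.drop_take] at hp'
        exact hmin q hq (hp'.trans (List.take_prefix _ _))
      · rw [if_neg hcond, hsplit]
        apply ih
        refine ⟨by simp; omega, ?_, ?_, ?_⟩
        · rw [List.drop_append_of_le_length hpout]
          exact hpre.trans (List.prefix_append _ _)
        · intro q hq hp
          rw [List.drop_append_of_le_length (by omega)] at hp
          exact hmin q hq (pvPrefixOfAppend hp (by simp [pvOpenT]; omega))
        · rw [List.drop_append_of_le_length hpout]
          intro hi
          rcases pvInfixSingleton hi with h | h
          · exact hnoc h
          · apply hcond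
            rw [pvCloseSliceIff]
            have hsub : out.drop p ++ [c] = (out ++ [c]).drop p :=
              (List.drop_append_of_le_length hpout).symm
            exact (hsub ▸ h).trans (List.drop_suffix _ _)

-- ===== VERDICT (by name: the statement is the Claim_ definition above) =====
theorem remove_result_tags_spec : Claim_equal_remove_result_tags := by
  intro s _
  unfold Spec_remove_result_tags remove_result_tags remove_result_tags_alt
  have h := pvScanEq s.toList [] none (by intro h; simpa [pvOpenT] using h.length_le)
  rw [← h]; rfl
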